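-- pv_equiv track=rewrite | github.com/MeghPatel327/IITM-GRPAs | week 9/5.py | ancestry
-- ===== SOURCE A (Python) =====
-- def ancestry(P, present, past):
--     if present == past:
--         return [past]
--     if present not in P:
--         return None  # If the present person is not in P, no path exists
--     parent = P[present]
--     path = ancestry(P, parent, past)
--     return [present] + path if path else None
-- ===== SOURCE B (Python) =====
-- def ancestry(P, present, past):
--     d = dict(P)
--     # stage 1: tabulate iterated parent lookups; len(P) steps cover every acyclic chain
--     its = [present]
--     x = present
--     for _ in range(len(P)):
--         x = d.get(x, x)
--         its.append(x)
--     # stage 2: scan the table for the first terminator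
--     out = []
--     for x in its:
--         if x == past:
--             out.append(past)
--             return out
--         if x not in d:
--             return None
--         out.append(x)
--     return None
-- ===== Notes on version B (the rewrite author's own statement) =====
-- stated objective: alternative
-- what changed: Replaces A's back-to-front recursion (building the path by repeated [present]+path concatenations) with two staged passes: first tabulate len(P)+1 iterated parent lookups into a list, then scan that table once for the first occurrence of past or of a node with no parent; this also makes B total (None on cyclic chains where A overflows the stack).
import Mathlib
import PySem

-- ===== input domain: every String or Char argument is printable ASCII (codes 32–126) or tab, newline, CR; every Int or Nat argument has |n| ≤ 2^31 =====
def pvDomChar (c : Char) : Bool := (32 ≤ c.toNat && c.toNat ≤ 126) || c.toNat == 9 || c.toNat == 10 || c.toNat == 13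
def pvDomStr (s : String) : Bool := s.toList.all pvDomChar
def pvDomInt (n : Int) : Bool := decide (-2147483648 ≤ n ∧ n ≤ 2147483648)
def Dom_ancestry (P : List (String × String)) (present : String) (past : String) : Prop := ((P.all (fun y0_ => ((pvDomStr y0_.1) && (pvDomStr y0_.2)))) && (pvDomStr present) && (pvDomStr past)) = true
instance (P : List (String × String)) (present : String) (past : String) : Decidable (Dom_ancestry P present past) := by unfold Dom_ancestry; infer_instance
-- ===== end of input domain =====

-- B replaces A's back-to-front recursion by two staged passes (tabulate iterated parent
-- lookups, then scan the table for the first terminator); objective: alternative. Pre_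
-- excludes non-terminating parent chains, where Python A raises RecursionError; B returns None there.


-- ===== PORT A =====
-- Fueled transcription of A's recursion; fuel P.length+1 exceeds the depth of every
-- terminating (Pre_) chain, so on Pre_ the fuel never runs out.
def ancestryFuelA (fuel : Nat) (P : List (String × String)) (present past : String) :
    Option (List String) :=
  match fuel with
  | 0 => none
  | fuel + 1 =>
    if present = past then some [past]
    else
      match (PySem.Dict.mk P).get? present with
      | none => none
      | some parent =>
        match ancestryFuelA fuel P parent past with
        | some path => if path.isEmpty then none else some (present :: path)  -- 'if path else None'
        | none => none

def ancestry (P : List (String × String)) (present : String) (past : String) : Option (List String) :=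
  ancestryFuelA (P.length + 1) P present past

-- ===== PORT B =====
-- x = d.get(x, x)
def stepB (P : List (String × String)) (x : String) : String :=
  (PySem.Dict.mk P).getD x x

-- stage 1: 'for _ in range(len(P)): x = d.get(x, x); its.append(x)', state = (its, x)
def buildIts (P : List (String × String)) (present : String) : List String × String :=
  (List.range P.length).foldl
    (fun s _ => (s.1 ++ [stepB P s.2], stepB P s.2)) ([present], present)

-- stage 2: 'for x in its: …', out is the growing accumulator
def scanIts (P : List (String × String)) (past : String) :
    List String → List String → Option (List String)
  | [], _ => none
  | x :: rest, out =>
    if x = past then some (out ++ [past])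
    else if ((PySem.Dict.mk P).get? x).isNone then none
    else scanIts P past rest (out ++ [x])

def ancestry_alt (P : List (String × String)) (present : String) (past : String) : Option (List String) :=
  scanIts P past (buildIts P present).1 []

-- ===== PRECONDITION & SPEC =====
-- one parent-lookup step of the chain (identity outside the keys)
def pvStep (P : List (String × String)) (x : String) : String :=
  match (PySem.Dict.mk P).get? x with
  | some y => y
  | none => x

-- Pre_ excludes exactly the inputs whose parent chain never terminates (a cycle): there Python A
-- raises RecursionError; a terminating chain stops within P.length steps.
def Pre_ancestry (P : List (String × String)) (present : String) (past : String) : Prop :=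
  ∃ n < P.length + 1,
    ((pvStep P)^[n] present = past ∨ (PySem.Dict.mk P).get? ((pvStep P)^[n] present) = none)
instance (P : List (String × String)) (present : String) (past : String) : Decidable (Pre_ancestry P present past) := by unfold Pre_ancestry; infer_instance

def pvWitness_ancestry : (List (String × String)) × String × String := ([("a", "b")], "a", "b")

def Spec_ancestry (P : List (String × String)) (present : String) (past : String) (out : Option (List String)) : Prop := out = ancestry_alt P present past
instance (P : List (String × String)) (present : String) (past : String) (out : Option (List String)) : Decidable (Spec_ancestry P present past out) := by unfold Spec_ancestry; infer_instance

-- ===== CLAIM (what is proved, stated in full; the proofs are below) =====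
def Claim_equal_ancestry : Prop := ∀ (P : List (String × String)) (present : String) (past : String), Dom_ancestry P present past → Pre_ancestry P present past → Spec_ancestry P present past (ancestry P present past)

-- ===== LEMMAS AND PROOFS =====

-- the pure iterate table: present, step present, step (step present), …  (n+1 entries)
def itsFrom (P : List (String × String)) : Nat → String → List String
  | 0, x => [x]
  | n + 1, x => x :: itsFrom P n (stepB P x)

-- a foldl that ignores the list's elements is an iterate
theorem foldl_const_iterate {α β : Type} (g : β → β) (l : List α) (s : β) :
    l.foldl (fun s _ => g s) s = g^[l.length] s := by
  induction l generalizing s with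
  | nil => rfl
  | cons a t ih => simp [List.foldl_cons, ih, Function.iterate_succ_apply]

-- stage 1 builds exactly the iterate table
theorem buildIts_iterate (P : List (String × String)) :
    ∀ (n : Nat) (acc : List String) (x : String),
      (fun s => ((s : List String × String).1 ++ [stepB P s.2], stepB P s.2))^[n] (acc ++ [x], x)
        = (acc ++ itsFrom P n x, (stepB P)^[n] x) := by
  intro n
  induction n with
  | zero => intro acc x; simp [itsFrom]
  | succ m ih =>
    intro acc x
    rw [Function.iterate_succ_apply, Function.iterate_succ_apply]
    have := ih (acc ++ [x]) (stepB P x)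
    simpa [itsFrom] using this

theorem buildIts_fst (P : List (String × String)) (present : String) :
    (buildIts P present).1 = itsFrom P P.length present := by
  unfold buildIts
  rw [foldl_const_iterate, List.length_range]
  have := buildIts_iterate P P.length [] present
  simp only [List.nil_append] at this
  exact congrArg Prod.fst this

-- A's fueled recursion never returns 'some []' (every returned path ends with past).
theorem ancestryFuelA_ne_nil (fuel : Nat) (P : List (String × String)) (present past : String) :
    ancestryFuelA fuel P present past ≠ some [] := by
  induction fuel generalizing present with
  | zero => simp [ancestryFuelA]
  | succ n ih =>
    simp only [ancestryFuelA]
    split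
    · simp
    · cases h : (PySem.Dict.mk P).get? present with
      | none => simp
      | some parent =>
        simp only
        cases hp : ancestryFuelA n P parent past with
        | none => simp
        | some path =>
          by_cases he : path = []
          · subst he; exact absurd hp (ih parent)
          · simp [List.isEmpty_iff, he]

-- one unfolding step of A's recursion at a non-terminal node
theorem fuelA_step (fuel : Nat) (P : List (String × String)) (present past parent : String)
    (hne : ¬ present = past) (h : (PySem.Dict.mk P).get? present = some parent) :
    ancestryFuelA (fuel + 1) P present past
      = match ancestryFuelA fuel P parent past with
        | some path => if path.isEmpty then none else some (present :: path)
        | none => none := by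
  simp only [ancestryFuelA, if_neg hne, h]

-- stage 2 on the iterate table reproduces A's recursion, prefixed by the accumulator
theorem scan_eq (P : List (String × String)) (past : String) :
    ∀ (n : Nat) (present : String) (acc : List String),
      scanIts P past (itsFrom P n present) acc
        = (ancestryFuelA (n + 1) P present past).map (acc ++ ·) := by
  intro n
  induction n with
  | zero =>
    intro present acc
    by_cases hpp : present = past
    · simp [itsFrom, scanIts, ancestryFuelA, hpp]
    · cases h : (PySem.Dict.mk P).get? present with
      | none => simp [itsFrom, scanIts, ancestryFuelA, hpp, h]
      | some parent => simp [itsFrom, scanIts, ancestryFuelA, hpp, h]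
  | succ m ih =>
    intro present acc
    by_cases hpp : present = past
    · simp [itsFrom, scanIts, ancestryFuelA, hpp]
    · cases h : (PySem.Dict.mk P).get? present with
      | none => simp [itsFrom, scanIts, ancestryFuelA, hpp, h]
      | some parent =>
        have hstep : stepB P present = parent := by
          simp [stepB, PySem.Dict.getD_eq_get?_getD, h]
        simp only [itsFrom, scanIts, if_neg hpp, h, hstep, Option.isNone_some,
          Bool.false_eq_true, if_false]
        rw [ih parent (acc ++ [present]), fuelA_step (m + 1) P present past parent hpp h]
        cases hp : ancestryFuelA (m + 1) P parent past with
        | none => simp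
        | some path =>
          have hne : path ≠ [] := fun hnil =>
            ancestryFuelA_ne_nil (m + 1) P parent past (hnil ▸ hp)
          simp [List.isEmpty_iff, hne]

-- ===== VERDICT (by name: the statements are the Claim_ definitions above) =====
theorem ancestry_spec : Claim_equal_ancestry := by
  intro P present past _ _
  show ancestry P present past = ancestry_alt P present past
  unfold ancestry ancestry_alt
  rw [buildIts_fst, scan_eq]
  cases ancestryFuelA (P.length + 1) P present past <;> simp
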